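-- pv_equiv track=rewrite | github.com/amponaja/Modul-1 | hollow_triangle.py | hollowTriangel
-- ===== SOURCE A (Python) =====
-- def hollowTriangel(angka) :
--
--     if type(angka) != int :
--         return 'Just input number'
--     else :
--         bintang = ''
--         for a in range(0,angka) :
--             if a == angka-1 :
--                 bintang += '#'*(angka*2-1)
--             elif a == 0 :
--                 bintang += '_'*(angka-a-1) + '#' + '_'*(angka-a-1) + '\n'
--             else :
--                 bintang += '_'*(angka-a-1) + '#' + '_'*(a*2-1) + '#' + '_'*(angka-a-1) + '\n'
--
--         return bintang
-- ===== SOURCE B (Python) =====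
-- def hollowTriangel(angka):
--     if type(angka) != int:
--         return 'Just input number'
--     n = angka
--     # Build only the LEFT HALF of each row (length n, centre included),
--     # then obtain the full row by mirror reflection: row = half + half[-2::-1]
--     # (the reversed half without its centre). The last row's half is all '#',
--     # so its reflection is the solid base.
--     halves = ['#' * n if a == n - 1 else '_' * (n - 1 - a) + '#' + '_' * a
--               for a in range(n)]
--     return '\n'.join(h + h[-2::-1] for h in halves)
-- ===== Notes on version B (the rewrite author's own statement) =====
-- stated objective: alternative
-- what changed: B exploits the rows' mirror symmetry: it builds only each row's left half (centre included) in one pass, then produces each full row by reversal-reflection (half + half[-2::-1]) and joins with newlines, instead of A's single loop concatenating every run of '_' and '#' of the full row explicitly in three branches.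
import Mathlib
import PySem

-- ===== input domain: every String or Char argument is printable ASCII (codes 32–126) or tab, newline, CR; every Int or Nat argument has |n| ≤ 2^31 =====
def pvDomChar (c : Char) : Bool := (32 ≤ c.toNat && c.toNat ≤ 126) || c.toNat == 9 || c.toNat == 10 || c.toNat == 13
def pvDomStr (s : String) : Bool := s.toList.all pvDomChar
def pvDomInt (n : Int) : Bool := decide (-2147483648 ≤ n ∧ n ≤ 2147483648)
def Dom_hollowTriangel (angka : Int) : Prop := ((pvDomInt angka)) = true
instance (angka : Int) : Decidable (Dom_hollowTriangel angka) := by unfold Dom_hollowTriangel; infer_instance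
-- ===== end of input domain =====

-- B builds only each row's left half and obtains the full row by reversal-reflection,
-- instead of A's concatenation of every run of the full row; objective: alternative
-- decomposition, same cost. The Python 'type(angka) != int' guard is always false for
-- an Int argument, so it vanishes in both ports.

-- ===== PORT A =====
-- one iteration of A's loop body: the piece appended to `bintang` for index a
def pvARow (angka a : Int) : List Char :=
  if a = angka - 1 then
    List.replicate (angka * 2 - 1).toNat '#'
  else if a = 0 then
    List.replicate (angka - a - 1).toNat '_' ++ '#' ::
      (List.replicate (angka - a - 1).toNat '_' ++ ['\n'])
  else
    List.replicate (angka - a - 1).toNat '_' ++ '#' ::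
      (List.replicate (a * 2 - 1).toNat '_' ++ '#' ::
        (List.replicate (angka - a - 1).toNat '_' ++ ['\n']))

def hollowTriangel (angka : Int) : String :=
  String.ofList ((PySem.List.pyRange 0 angka 1).foldl (fun acc a => acc ++ pvARow angka a) [])

-- ===== PORT B =====
-- left half of row a (centre column included); the last row's half is all '#'
def pvBHalf (n a : Int) : List Char :=
  if a = n - 1 then List.replicate n.toNat '#'
  else List.replicate (n - 1 - a).toNat '_' ++ '#' :: List.replicate a.toNat '_'

-- h + h[-2::-1] : full row from its left half by mirror reflection;
-- h[-2::-1] (reversed h without its last element) is ported by hand as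
-- h.dropLast.reverse — exact for every h, including the empty one
def pvBMirror (h : List Char) : List Char := h ++ h.dropLast.reverse

def hollowTriangel_alt (angka : Int) : String :=
  String.ofList (List.intercalate ['\n']
    (((PySem.List.pyRange 0 angka 1).map (pvBHalf angka)).map pvBMirror))

-- ===== PRECONDITION & SPEC =====
def Spec_hollowTriangel (angka : Int) (out : String) : Prop := out = hollowTriangel_alt angka
instance (angka : Int) (out : String) : Decidable (Spec_hollowTriangel angka out) := by unfold Spec_hollowTriangel; infer_instance

-- ===== CLAIM (what is proved, stated in full; the proofs are below) =====
def Claim_equal_hollowTriangel : Prop := ∀ (angka : Int), Dom_hollowTriangel angka → Spec_hollowTriangel angka (hollowTriangel angka)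

-- ===== LEMMAS AND PROOFS =====

lemma pv_intercalate_last (rows : List (List Char)) (last : List Char) :
    List.intercalate ['\n'] (rows ++ [last])
      = rows.flatMap (· ++ ['\n']) ++ last := by
  induction rows with
  | nil => simp [List.intercalate]
  | cons r rs ih =>
    rw [List.cons_append]
    have hstep : List.intercalate ['\n'] (r :: (rs ++ [last]))
        = r ++ ['\n'] ++ List.intercalate ['\n'] (rs ++ [last]) := by
      cases rs <;> simp [List.intercalate, List.intersperse]
    rw [hstep, ih]; simp

-- each non-last row: A's appended piece is B's mirrored half plus a newline
lemma pv_rev_drop (m k : Nat) (c d : Char) :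
    ((List.replicate m c ++ d :: List.replicate (k + 1) c).dropLast.reverse)
      = List.replicate k c ++ d :: List.replicate m c := by
  have h : (List.replicate m c ++ d :: List.replicate (k + 1) c).dropLast
      = List.replicate m c ++ d :: List.replicate k c := by
    rw [List.replicate_succ', ← List.cons_append, ← List.append_assoc,
      List.dropLast_concat]
  rw [h, List.reverse_append, List.reverse_cons, List.reverse_replicate,
    List.reverse_replicate]
  simp

-- each non-last row: A's appended piece is B's mirrored half plus a newline
lemma pv_row_eq (n a : Int) (ha : 0 ≤ a) (hlt : a < n - 1) :
    pvARow n a = pvBMirror (pvBHalf n a) ++ ['\n'] := by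
  have hne : a ≠ n - 1 := by omega
  by_cases h0 : a = 0
  · subst h0
    rw [pvARow, if_neg hne, if_pos rfl, pvBMirror, pvBHalf, if_neg hne]
    simp
  · rw [pvARow, if_neg hne, if_neg h0, pvBMirror, pvBHalf, if_neg hne,
      show a.toNat = (a.toNat - 1) + 1 from by omega, pv_rev_drop,
      show (a * 2 - 1).toNat = ((a.toNat - 1) + 1) + (a.toNat - 1) from by omega,
      List.replicate_add]
    simp only [show (n - 1 - a).toNat = (n - a - 1).toNat from by omega, List.append_assoc,
      List.cons_append, List.replicate_add]

lemma pv_last_row_eq (n : Int) (hn : 0 < n) :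
    pvARow n (n - 1) = pvBMirror (pvBHalf n (n - 1)) := by
  rw [pvARow, if_pos rfl, pvBMirror, pvBHalf, if_pos rfl, List.dropLast_replicate,
    List.reverse_replicate, ← List.replicate_add]
  congr 1; omega

-- ===== VERDICT (by name: the statement is the Claim_ definition above) =====
theorem hollowTriangel_spec : Claim_equal_hollowTriangel := by
  intro angka _
  unfold Spec_hollowTriangel hollowTriangel hollowTriangel_alt
  by_cases hpos : 0 < angka
  · have hsplit := PySem.List.pyRange_one_append 0 (angka - 1) angka (by omega) (by omega)
    have hsing := PySem.List.pyRange_one_singleton (angka - 1)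
    rw [sub_add_cancel] at hsing
    rw [hsplit, hsing, PySem.List.foldl_append_eq_flatMap, List.nil_append, List.map_append,
      List.map_append, List.map_cons, List.map_nil, List.map_cons, List.map_nil,
      pv_intercalate_last, List.flatMap_append]
    simp only [List.flatMap_map]
    have hmapeq : List.flatMap (pvARow angka) (PySem.List.pyRange 0 (angka - 1) 1)
        = List.flatMap (fun a => pvBMirror (pvBHalf angka a) ++ ['\n'])
            (PySem.List.pyRange 0 (angka - 1) 1) :=
      List.flatMap_congr fun a hmem => by
        have hb := (PySem.List.mem_pyRange_one).1 hmem
        exact pv_row_eq angka a hb.1 (by omega)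
    rw [hmapeq]
    simp [pv_last_row_eq angka hpos]
  · rw [PySem.List.pyRange_one_eq_nil (by omega)]
    simp [List.intercalate]
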